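-- pv_equiv track=rewrite | github.com/AnRi1202/algorithm | week2/2-b.py | seq_prime_all
-- ===== SOURCE A (Python) =====
-- def seq_prime_all(n):
--   seq_prime_List = [0] * (n+1)
--   is_prime=[True]*(n+1)
--   i=2
--   while(i*i<=n):
--     if(is_prime[i]):
--       j=i*i
--       while(j<=n):
--         is_prime[j]=False
--         j+=i
--     i+=1
--   sum = 0
--   #is_primeがTrueであるNについて、N+1/2が素数であるかを判定する
--   for i in range(3,n+1):
--     if is_prime[i] and is_prime[(i+1)//2]:
--       sum+=1
--     seq_prime_List[i-1]= sum
--   return seq_prime_List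
-- ===== SOURCE B (Python) =====
-- def seq_prime_all(n):
--     def is_prime(m):
--         if m < 2:
--             return False
--         if m % 2 == 0:
--             return m == 2
--         d = 3
--         while d * d <= m:
--             if m % d == 0:
--                 return False
--             d += 2
--         return True
--     result = [0] * (n + 1)
--     s = 0
--     for i in range(3, n + 1):
--         if is_prime(i) and is_prime((i + 1) // 2):
--             s += 1
--         result[i - 1] = s
--     return result
-- ===== Notes on version B (the rewrite author's own statement) =====
-- stated objective: simpler
-- what changed: Replaced the in-place Eratosthenes sieve array with a direct trial-division is_prime helper queried inside the single counting loop; the boolean array and its nested marking loops disappear.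
import Mathlib
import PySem

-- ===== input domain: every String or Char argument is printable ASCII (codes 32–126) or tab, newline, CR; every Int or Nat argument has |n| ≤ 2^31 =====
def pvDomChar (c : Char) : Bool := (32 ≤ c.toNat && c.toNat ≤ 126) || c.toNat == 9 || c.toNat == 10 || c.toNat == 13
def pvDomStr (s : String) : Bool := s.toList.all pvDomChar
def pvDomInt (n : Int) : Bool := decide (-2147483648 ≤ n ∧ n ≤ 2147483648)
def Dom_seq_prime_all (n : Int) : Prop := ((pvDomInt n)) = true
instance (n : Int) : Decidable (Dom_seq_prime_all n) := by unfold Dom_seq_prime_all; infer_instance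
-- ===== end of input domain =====

-- B replaces A's Eratosthenes sieve array with a direct trial-division is_prime helper
-- inside the single counting loop (objective: simpler; not faster).
-- All list indices touched by either program are provably nonnegative and in range,
-- so List.getD / List.set are exact for Python's indexing here; [0]*(n+1) is
-- List.replicate (n+1).toNat (Python's negative repeat count yields []).

-- ===== PORT A =====
-- inner while: j = i*i; while j <= n: is_prime[j] = False; j += i
-- (the 0 < i guard only makes the recursion total; every call has i ≥ 2)
def pvMark (nN i j : Nat) (arr : List Bool) : List Bool :=
  if h : j ≤ nN ∧ 0 < i then pvMark nN i (j + i) (arr.set j false) else arr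
termination_by nN + 1 - j
decreasing_by omega

-- outer while: i = 2; while i*i <= n: if is_prime[i]: mark; i += 1
def pvSieve (nN i : Nat) (arr : List Bool) : List Bool :=
  if h : i * i ≤ nN then
    pvSieve nN (i + 1) (if arr.getD i false then pvMark nN i (i * i) arr else arr)
  else arr
termination_by nN + 1 - i
decreasing_by
  have : i ≤ i * i := Nat.le_mul_self i
  omega

-- for i in range(3, n+1): if is_prime[i] and is_prime[(i+1)//2]: sum += 1; seq_prime_List[i-1] = sum
def pvCount (nN : Nat) (isp : List Bool) (i : Nat) (s : Int) (res : List Int) : List Int :=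
  if i ≤ nN then
    let s' := if isp.getD i false && isp.getD ((i + 1) / 2) false then s + 1 else s
    pvCount nN isp (i + 1) s' (res.set (i - 1) s')
  else res
termination_by nN + 1 - i
decreasing_by omega

def seq_prime_all (n : Int) : List Int :=
  pvCount n.toNat (pvSieve n.toNat 2 (List.replicate (n + 1).toNat true)) 3 0
    (List.replicate (n + 1).toNat 0)

-- ===== PORT B =====
-- d = 3; while d*d <= m: if m % d == 0: return False; d += 2; return True
def pvTrial (m d : Nat) : Bool :=
  if h : d * d ≤ m then
    if m % d = 0 then false else pvTrial m (d + 2)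
  else true
termination_by m + 1 - d
decreasing_by
  have : d ≤ d * d := Nat.le_mul_self d
  omega

def pvIsPrime (m : Nat) : Bool :=
  if m < 2 then false
  else if m % 2 = 0 then decide (m = 2)
  else pvTrial m 3

def pvCountAlt (nN : Nat) (i : Nat) (s : Int) (res : List Int) : List Int :=
  if i ≤ nN then
    let s' := if pvIsPrime i && pvIsPrime ((i + 1) / 2) then s + 1 else s
    pvCountAlt nN (i + 1) s' (res.set (i - 1) s')
  else res
termination_by nN + 1 - i
decreasing_by omega

def seq_prime_all_alt (n : Int) : List Int :=
  pvCountAlt n.toNat 3 0 (List.replicate (n + 1).toNat 0)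

-- ===== PRECONDITION & SPEC =====
def Spec_seq_prime_all (n : Int) (out : List Int) : Prop := out = seq_prime_all_alt n
instance (n : Int) (out : List Int) : Decidable (Spec_seq_prime_all n out) := by unfold Spec_seq_prime_all; infer_instance

-- ===== CLAIM (what is proved, stated in full; the proofs are below) =====
def Claim_equal_seq_prime_all : Prop := ∀ (n : Int), Dom_seq_prime_all n → Spec_seq_prime_all n (seq_prime_all n)

-- ===== LEMMAS AND PROOFS =====

-- a number ≥ 2 is prime iff it has no divisor e with 2 ≤ e and e*e ≤ m
lemma pv_prime_iff_no_sqrt_div (m : Nat) (hm : 2 ≤ m) :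
    Nat.Prime m ↔ ∀ e, 2 ≤ e → e * e ≤ m → ¬ e ∣ m := by
  constructor
  · intro hp e he hee hdvd
    rcases (Nat.Prime.eq_one_or_self_of_dvd hp e hdvd) with h | h
    · omega
    · subst h; nlinarith
  · intro h
    by_contra hnp
    have hpos : 0 < m := by omega
    have hpf : Nat.minFac m ∣ m := Nat.minFac_dvd m
    have h2 : 2 ≤ Nat.minFac m := (Nat.minFac_prime (by omega)).two_le
    have hsq : Nat.minFac m * Nat.minFac m ≤ m := by
      have := Nat.minFac_sq_le_self hpos hnp
      simpa [pow_two] using this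
    exact h _ h2 hsq hpf

lemma pv_composite_iff (m : Nat) (hm : 2 ≤ m) :
    (∃ p, Nat.Prime p ∧ p ∣ m ∧ p * p ≤ m) ↔ ¬ Nat.Prime m := by
  constructor
  · rintro ⟨p, hp, hdvd, hsq⟩ hprime
    exact (pv_prime_iff_no_sqrt_div m hm).1 hprime p hp.two_le hsq hdvd
  · intro hnp
    refine ⟨Nat.minFac m, Nat.minFac_prime (by omega), Nat.minFac_dvd m, ?_⟩
    have := Nat.minFac_sq_le_self (by omega : 0 < m) hnp
    simpa [pow_two] using this

-- ---- trial division correctness ----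
lemma pvTrial_eq (m : Nat) (hm : 3 ≤ m) (hodd : m % 2 = 1) :
    ∀ fuel d, m + 1 - d ≤ fuel → 3 ≤ d → d % 2 = 1 →
      (∀ e, 2 ≤ e → e < d → ¬ e ∣ m) →
      (pvTrial m d = true ↔ Nat.Prime m) := by
  intro fuel
  induction fuel with
  | zero =>
    intro d hle hd hdodd hsmall
    have hdm : m < d := by omega
    rw [pvTrial]
    have hgt : ¬ d * d ≤ m := by nlinarith
    simp only [hgt, dite_false, true_iff]
    rw [pv_prime_iff_no_sqrt_div m (by omega)]
    intro e he hee hdvd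
    exact hsmall e he (by nlinarith) hdvd
  | succ f ihf =>
    intro d hle hd hdodd hsmall
    rw [pvTrial]
    split_ifs with h1 h2
    · -- d*d ≤ m, m % d = 0 : returns false; m is composite
      simp only [false_iff]
      intro hp
      have hdvd : d ∣ m := Nat.dvd_of_mod_eq_zero h2
      exact (pv_prime_iff_no_sqrt_div m (by omega)).1 hp d (by omega) h1 hdvd
    · -- d*d ≤ m, m % d ≠ 0 : recurse with d+2
      have hdm : d ≤ m := le_trans (Nat.le_mul_self d) h1
      refine ihf (d + 2) (by omega) (by omega) (by omega) ?_
      intro e he helt hdvd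
      rcases Nat.lt_or_ge e d with h | h
      · exact hsmall e he h hdvd
      · have : e = d ∨ e = d + 1 := by omega
        rcases this with rfl | rfl
        · exact h2 (Nat.dvd_iff_mod_eq_zero.mp hdvd)
        · have h2e : (2 : Nat) ∣ d + 1 := ⟨(d + 1) / 2, by omega⟩
          have h2m : (2 : Nat) ∣ m := h2e.trans hdvd
          have := Nat.dvd_iff_mod_eq_zero.mp h2m
          omega
    · -- d*d > m : returns true; no divisor up to sqrt -> prime
      simp only [true_iff]
      rw [pv_prime_iff_no_sqrt_div m (by omega)]
      intro e he hee hdvd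
      have : e < d := by nlinarith
      exact hsmall e he this hdvd

lemma pvIsPrime_eq (m : Nat) : pvIsPrime m = true ↔ Nat.Prime m := by
  unfold pvIsPrime
  split_ifs with h1 h2
  · simp only [false_iff]
    intro hp
    have := hp.two_le
    omega
  · constructor
    · intro h
      have : m = 2 := by simpa using h
      simpa [this] using Nat.prime_two
    · intro hp
      have heq : m = 2 := (Nat.Prime.even_iff hp).1 (Nat.even_iff.mpr h2)
      simp [heq]
  · exact pvTrial_eq m (by omega) (by omega) (m + 1 - 3) 3 (le_refl _) (by omega) (by omega)
      (by
        intro e he helt hdvd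
        have : e = 2 := by omega
        subst this
        have := Nat.dvd_iff_mod_eq_zero.mp hdvd
        omega)

-- ---- sieve correctness ----
def pvMarked (i k : Nat) : Prop := ∃ p, Nat.Prime p ∧ p < i ∧ p ∣ k ∧ p * p ≤ k

lemma pvMark_length (nN i : Nat) :
    ∀ fuel j (arr : List Bool), nN + 1 - j ≤ fuel →
      (pvMark nN i j arr).length = arr.length := by
  intro fuel
  induction fuel with
  | zero =>
    intro j arr hle
    rw [pvMark]
    have : ¬ (j ≤ nN ∧ 0 < i) := by omega
    simp [this]
  | succ f ihf =>
    intro j arr hle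
    rw [pvMark]
    split_ifs with h
    · rw [ihf (j + i) _ (by omega)]
      simp
    · rfl

lemma pvMark_getD (nN i : Nat) (hi : 0 < i) (k : Nat) (hk : k ≤ nN) :
    ∀ fuel j (arr : List Bool), nN + 1 - j ≤ fuel → arr.length = nN + 1 →
      (pvMark nN i j arr).getD k false =
        if j ≤ k ∧ i ∣ (k - j) then false else arr.getD k false := by
  intro fuel
  induction fuel with
  | zero =>
    intro j arr hle hlen
    rw [pvMark]
    have h1 : ¬ (j ≤ nN ∧ 0 < i) := by omega
    have h2 : ¬ (j ≤ k ∧ i ∣ (k - j)) := by omega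
    simp [h1, h2]
  | succ f ihf =>
    intro j arr hle hlen
    rw [pvMark]
    by_cases h : j ≤ nN ∧ 0 < i
    · rw [dif_pos h, ihf (j + i) _ (by omega) (by simpa using hlen)]
      rcases eq_or_ne k j with rfl | hne
      · have hji : ¬ (k + i ≤ k ∧ i ∣ (k - (k + i))) := by omega
        have hklen : k < arr.length := by omega
        rw [if_neg hji, if_pos ⟨le_refl k, by simp⟩]
        simp [List.getD, hklen]
      · have hne' : j ≠ k := Ne.symm hne
        have hget : (arr.set j false).getD k false = arr.getD k false := by
          simp [List.getD, hne']
        rw [hget]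
        by_cases hc : j ≤ k ∧ i ∣ (k - j)
        · have hcond : j + i ≤ k ∧ i ∣ (k - (j + i)) := by
            obtain ⟨hjk, c, hc'⟩ := hc
            have hc1 : 1 ≤ c := by
              rcases Nat.eq_zero_or_pos c with rfl | h' 
              · omega
              · exact h'
            have hic : i ≤ i * c := Nat.le_mul_of_pos_right i hc1
            refine ⟨by omega, c - 1, ?_⟩
            rw [Nat.mul_sub, Nat.mul_one]
            omega
          rw [if_pos hcond, if_pos hc]
        · have hcond : ¬ (j + i ≤ k ∧ i ∣ (k - (j + i))) := by
            rintro ⟨hjk, c, hc'⟩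
            exact hc ⟨by omega, c + 1, by rw [Nat.mul_add, Nat.mul_one]; omega⟩
          rw [if_neg hcond, if_neg hc]
    · rw [dif_neg h]
      have hj : ¬ (j ≤ k ∧ i ∣ (k - j)) := by omega
      rw [if_neg hj]

lemma pv_no_small_prime_factor (m : Nat) (hm : 2 ≤ m)
    (h : ¬ pvMarked m m) : Nat.Prime m := by
  by_contra hnp
  obtain ⟨p, hp, hdvd, hsq⟩ := (pv_composite_iff m hm).2 hnp
  have hple : p ≤ m := Nat.le_of_dvd (by omega) hdvd
  have hpm : p < m := by
    rcases Nat.lt_or_eq_of_le hple with h' | rfl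
    · exact h'
    · nlinarith [hp.two_le]
  exact h ⟨p, hp, hpm, hdvd, hsq⟩

lemma pv_marked_self_not_prime (m : Nat) (h : pvMarked m m) : ¬ Nat.Prime m := by
  obtain ⟨p, hp, hpm, hdvd, _⟩ := h
  intro hprime
  rcases (Nat.Prime.eq_one_or_self_of_dvd hprime p hdvd) with h' | h'
  · exact absurd h' (Nat.Prime.ne_one hp)
  · omega

lemma pvSieve_getD (nN : Nat) :
    ∀ fuel i (arr : List Bool), nN + 1 - i ≤ fuel → 2 ≤ i → arr.length = nN + 1 →
    (∀ k, k ≤ nN → (arr.getD k false = false ↔ pvMarked i k)) →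
    ∀ k, k ≤ nN →
      ((pvSieve nN i arr).getD k false = false ↔
        ∃ p, Nat.Prime p ∧ p ∣ k ∧ p * p ≤ k) := by
  intro fuel
  induction fuel with
  | zero =>
    intro i arr hle hi hlen hinv k hk
    rw [pvSieve]
    have hii : ¬ i * i ≤ nN := by
      have := Nat.le_mul_self i
      omega
    rw [dif_neg hii]
    rw [hinv k hk]
    constructor
    · rintro ⟨p, hp, hlt, hdvd, hsq⟩
      exact ⟨p, hp, hdvd, hsq⟩
    · rintro ⟨p, hp, hdvd, hsq⟩
      have : p ≤ p * p := Nat.le_mul_self p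
      exact ⟨p, hp, by omega, hdvd, hsq⟩
  | succ f ihf =>
    intro i arr hle hi hlen hinv k hk
    rw [pvSieve]
    by_cases hii : i * i ≤ nN
    · -- i * i ≤ nN
      rw [dif_pos hii]
      have hiN : i ≤ nN := le_trans (Nat.le_mul_self i) hii
      cases harr : arr.getD i false with
      | true =>
        -- is_prime[i] holds: i is prime, mark its multiples from i*i
        have hiprime : Nat.Prime i := by
          apply pv_no_small_prime_factor i hi
          intro hm
          have hfalse := (hinv i hiN).2 hm
          rw [hfalse] at harr
          exact Bool.noConfusion harr
        rw [if_pos rfl]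
        refine ihf (i + 1) _ (by omega) (by omega)
          (by rw [pvMark_length nN i (nN + 1 - (i * i)) (i * i) arr (le_refl _)]; exact hlen) ?_ k hk
        intro k' hk'
        rw [pvMark_getD nN i (by omega) k' hk' (nN + 1 - (i * i)) (i * i) arr (le_refl _) hlen]
        split_ifs with hcond
        · constructor
          · intro _
            obtain ⟨hle', hdvd⟩ := hcond
            have hdk : i ∣ k' := by
              have h1 : i ∣ i * i := Dvd.intro i rfl
              have := Nat.dvd_add hdvd h1
              rwa [Nat.sub_add_cancel hle'] at this
            exact ⟨i, hiprime, by omega, hdk, hle'⟩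
          · intro _
            rfl
        · rw [hinv k' hk']
          constructor
          · rintro ⟨p, hp, hlt, hdvd, hsq⟩
            exact ⟨p, hp, by omega, hdvd, hsq⟩
          · rintro ⟨p, hp, hlt, hdvd, hsq⟩
            rcases Nat.lt_or_ge p i with h' | h'
            · exact ⟨p, hp, h', hdvd, hsq⟩
            · have hpi : p = i := by omega
              subst hpi
              exact absurd ⟨hsq, Nat.dvd_sub hdvd (Dvd.intro p rfl)⟩ hcond
      | false =>
        -- is_prime[i] is false: i is composite, nothing marked this round
        have hnotp : ¬ Nat.Prime i := pv_marked_self_not_prime i ((hinv i hiN).1 harr)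
        rw [if_neg Bool.false_ne_true]
        refine ihf (i + 1) arr (by omega) (by omega) hlen ?_ k hk
        intro k' hk'
        rw [hinv k' hk']
        constructor
        · rintro ⟨p, hp, hlt, hdvd, hsq⟩
          exact ⟨p, hp, by omega, hdvd, hsq⟩
        · rintro ⟨p, hp, hlt, hdvd, hsq⟩
          rcases Nat.lt_or_ge p i with h' | h'
          · exact ⟨p, hp, h', hdvd, hsq⟩
          · have : p = i := by omega
            subst this
            exact absurd hp hnotp
    · -- exit: i * i > nN
      rw [dif_neg hii, hinv k hk]
      constructor
      · rintro ⟨p, hp, hlt, hdvd, hsq⟩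
        exact ⟨p, hp, hdvd, hsq⟩
      · rintro ⟨p, hp, hdvd, hsq⟩
        have hpp : p * p ≤ nN := le_trans hsq hk
        have : p < i := by nlinarith
        exact ⟨p, hp, this, hdvd, hsq⟩

-- the finished sieve agrees with trial division on every queried cell 2 ≤ k ≤ nN
lemma pvSieve_agrees (nN : Nat) (k : Nat) (h2 : 2 ≤ k) (hk : k ≤ nN) :
    (pvSieve nN 2 (List.replicate (nN + 1) true)).getD k false = pvIsPrime k := by
  have hchar := pvSieve_getD nN (nN + 1 - 2) 2 (List.replicate (nN + 1) true)
    (le_refl _) (le_refl _) (by simp)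
    (by
      intro k' hk'
      have : (List.replicate (nN + 1) true).getD k' false = true := by
        simp [List.getD, Nat.lt_succ_of_le hk']
      rw [this]
      simp only [Bool.true_eq_false, false_iff]
      rintro ⟨p, hp, hlt, -, -⟩
      have := hp.two_le
      omega) k hk
  rw [pv_composite_iff k h2] at hchar
  cases hb : (pvSieve nN 2 (List.replicate (nN + 1) true)).getD k false with
  | false =>
    have hnp : ¬ Nat.Prime k := hchar.1 hb
    exact ((Bool.eq_false_iff).mpr (fun hbt => hnp ((pvIsPrime_eq k).1 hbt))).symm
  | true =>
    have hp : Nat.Prime k := by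
      by_contra hnp
      have := hchar.2 hnp
      rw [hb] at this
      exact absurd this (by simp)
    symm
    simpa [pvIsPrime_eq] using hp

lemma pv_count_eq_alt (nN : Nat) (sv : List Bool)
    (hs : ∀ k, 2 ≤ k → k ≤ nN → sv.getD k false = pvIsPrime k) :
    ∀ fuel i s res, nN + 1 - i ≤ fuel → 3 ≤ i →
      pvCount nN sv i s res = pvCountAlt nN i s res := by
  intro fuel
  induction fuel with
  | zero =>
    intro i s res hle hi
    rw [pvCount, pvCountAlt]
    have : ¬ i ≤ nN := by omega
    simp [this]
  | succ f ihf =>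
    intro i s res hle hi
    rw [pvCount, pvCountAlt]
    by_cases h : i ≤ nN
    · rw [if_pos h, if_pos h]
      have e1 : sv.getD i false = pvIsPrime i := hs i (by omega) h
      have e2 : sv.getD ((i + 1) / 2) false = pvIsPrime ((i + 1) / 2) :=
        hs ((i + 1) / 2) (by omega) (by omega)
      rw [e1, e2]
      exact ihf (i + 1) _ _ (by omega) (by omega)
    · rw [if_neg h, if_neg h]

-- ===== VERDICT (by name: the statement is the Claim_ definition above) =====
theorem seq_prime_all_spec : Claim_equal_seq_prime_all := by
  intro n _
  unfold Spec_seq_prime_all seq_prime_all seq_prime_all_alt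
  rcases Nat.lt_or_ge n.toNat 3 with hn | hn
  · rw [pvCount, pvCountAlt]
    have : ¬ 3 ≤ n.toNat := by omega
    simp [this]
  · have hlen : (n + 1).toNat = n.toNat + 1 := by omega
    rw [hlen]
    exact pv_count_eq_alt n.toNat _ (fun k h2 hk => pvSieve_agrees n.toNat k h2 hk)
      (n.toNat + 1 - 3) 3 0 _ (le_refl _) (le_refl _)
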